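-- pv_equiv track=rewrite | github.com/Sesostrismage/advent_2020 | year_2020/day_24/day_24.py | split_directions
-- ===== SOURCE A (Python) =====
-- def split_directions(dir_str):
--     dir_list_str = []
--     idx = 0
--
--     while True:
--         if idx >= len(dir_str):
--             break
--         elif dir_str[idx] in ['n', 's']:
--             dir_list_str.append(dir_str[idx:idx+2])
--             idx += 2
--         else:
--             dir_list_str.append(dir_str[idx:idx+1])
--             idx += 1
--
--     return dir_list_str
-- ===== SOURCE B (Python) =====
-- def split_directions(dir_str):
--     # Run-parity cut rule instead of greedy lookahead/skip: a position starts a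
--     # new token exactly when the run of 'n'/'s' markers ending just before it
--     # has even length.  We keep that run length and the current token, and cut
--     # whenever the parity is even; no index arithmetic, slicing or lookahead.
--     out = []
--     tok = ''
--     run = 0
--     for c in dir_str:
--         if tok and run % 2 == 0:
--             out.append(tok)
--             tok = ''
--         tok += c
--         run = run + 1 if c in 'ns' else 0
--     if tok:
--         out.append(tok)
--     return out
-- ===== Notes on version B (the rewrite author's own statement) =====
-- stated objective: alternative
-- what changed: Replaces A's greedy index loop that slices and skips 2 after an 'n'/'s' by a parity rule: B tracks the length of the run of 'n'/'s' markers seen so far and cuts a new token exactly when that run has even length, with no lookahead, index arithmetic or slicing.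
import Mathlib
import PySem

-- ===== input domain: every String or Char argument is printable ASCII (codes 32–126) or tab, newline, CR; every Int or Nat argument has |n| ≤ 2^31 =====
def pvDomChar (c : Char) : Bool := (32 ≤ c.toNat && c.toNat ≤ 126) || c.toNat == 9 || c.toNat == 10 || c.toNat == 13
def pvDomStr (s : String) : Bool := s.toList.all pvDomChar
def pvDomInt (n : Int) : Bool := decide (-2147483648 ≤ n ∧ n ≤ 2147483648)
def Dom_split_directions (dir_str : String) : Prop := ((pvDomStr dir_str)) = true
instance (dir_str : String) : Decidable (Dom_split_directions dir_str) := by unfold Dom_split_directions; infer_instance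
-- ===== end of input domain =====

-- B replaces A's greedy index/slice/skip loop by a marker-run-parity cut rule
-- (cut a new token exactly when the run of 'n'/'s' markers has even length);
-- same O(n) cost, a genuinely different decision rule (objective: alternative).

-- ===== PORT A =====
-- the 'while True' loop of A: state is the current index idx into dir_str
def splitALoop (cs : List Char) (idx : Nat) : List String :=
  if idx ≥ cs.length then []
  else if PySem.List.pyGetD cs (idx : Int) ' ' ∈ ['n', 's'] then
    String.ofList (PySem.List.slice cs (some (idx : Int)) (some ((idx + 2 : Nat) : Int)))
      :: splitALoop cs (idx + 2)
  else
    String.ofList (PySem.List.slice cs (some (idx : Int)) (some ((idx + 1 : Nat) : Int)))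
      :: splitALoop cs (idx + 1)
termination_by cs.length - idx

def split_directions (dir_str : String) : List String :=
  splitALoop dir_str.toList 0

-- ===== PORT B =====
-- one iteration of B's for-loop: state (out, tok, run); flush tok when the
-- marker run is even, then extend tok with c and update the run length
def splitBStep (st : List String × List Char × Nat) (c : Char) : List String × List Char × Nat :=
  let fl := if st.2.1 ≠ [] ∧ st.2.2 % 2 = 0
            then (st.1 ++ [String.ofList st.2.1], ([] : List Char))
            else (st.1, st.2.1)
  (fl.1, fl.2 ++ [c], if c = 'n' ∨ c = 's' then st.2.2 + 1 else 0)

-- the final 'if tok: out.append(tok)'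
def splitBFin (st : List String × List Char × Nat) : List String :=
  if st.2.1 ≠ [] then st.1 ++ [String.ofList st.2.1] else st.1

def split_directions_alt (dir_str : String) : List String :=
  splitBFin (dir_str.toList.foldl splitBStep ([], [], 0))

-- ===== PRECONDITION & SPEC =====
def Spec_split_directions (dir_str : String) (out : List String) : Prop := out = split_directions_alt dir_str
instance (dir_str : String) (out : List String) : Decidable (Spec_split_directions dir_str out) := by unfold Spec_split_directions; infer_instance

-- ===== CLAIM (what is proved, stated in full; the proofs are below) =====
def Claim_equal_split_directions : Prop := ∀ (dir_str : String), Dom_split_directions dir_str → Spec_split_directions dir_str (split_directions dir_str)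

-- ===== LEMMAS AND PROOFS =====

-- reference greedy tokenisation, the bridge between the two ports
def greedyTok : List Char → List String
  | [] => []
  | c :: rest =>
    if c = 'n' ∨ c = 's' then
      match rest with
      | [] => [String.ofList [c]]
      | d :: rest' => String.ofList [c, d] :: greedyTok rest'
    else String.ofList [c] :: greedyTok rest

theorem splitALoop_eq_greedy (cs : List Char) (idx : Nat) :
    splitALoop cs idx = greedyTok (cs.drop idx) := by
  rw [splitALoop]
  by_cases hge : idx ≥ cs.length
  · simp [hge, List.drop_eq_nil_of_le hge, greedyTok]
  · have hlt : idx < cs.length := by omega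
    have hdrop : cs.drop idx = cs[idx] :: cs.drop (idx + 1) :=
      List.drop_eq_getElem_cons hlt
    have hget : PySem.List.pyGetD cs (idx : Int) ' ' = cs[idx] := by
      simp [PySem.List.pyGetD_natCast, hlt]
    by_cases hns : cs[idx] = 'n' ∨ cs[idx] = 's'
    · have hmem : PySem.List.pyGetD cs (idx : Int) ' ' ∈ ['n', 's'] := by
        simp [hget]; tauto
      rw [if_neg hge, if_pos hmem, PySem.List.slice_natCast,
        splitALoop_eq_greedy cs (idx + 2), hdrop]
      by_cases h1 : idx + 1 ≥ cs.length
      · have hd1 : cs.drop (idx + 1) = [] := List.drop_eq_nil_of_le h1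
        have hd2 : cs.drop (idx + 2) = [] :=
          List.drop_eq_nil_of_le (by omega)
        rw [hd1, hd2]
        simp only [Nat.add_sub_cancel_left, greedyTok, List.take_succ_cons, List.take_nil, if_pos hns]
      · have hlt1 : idx + 1 < cs.length := by omega
        have hdrop1 : cs.drop (idx + 1) = cs[idx + 1] :: cs.drop (idx + 2) :=
          List.drop_eq_getElem_cons hlt1
        rw [hdrop1]
        simp only [Nat.add_sub_cancel_left, greedyTok, List.take_succ_cons, List.take_zero, if_pos hns]
    · have hmem : PySem.List.pyGetD cs (idx : Int) ' ' ∉ ['n', 's'] := by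
        simp [hget]; tauto
      rw [if_neg hge, if_neg hmem, PySem.List.slice_natCast,
        splitALoop_eq_greedy cs (idx + 1), hdrop]
      cases hrest : List.drop (idx + 1) cs with
      | nil => simp only [Nat.add_sub_cancel_left, greedyTok, List.take_succ_cons,
          List.take_nil, if_neg hns]
      | cons d rest' => simp only [Nat.add_sub_cancel_left, greedyTok, List.take_succ_cons,
          List.take_zero, if_neg hns]
termination_by cs.length - idx

-- B's fold, started at a state holding a completed token (run parity even),
-- produces that token followed by the greedy tokenisation of the rest
theorem foldB_done (l : List Char) (out : List String) (tok : List Char) (run : Nat)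
    (htok : tok ≠ []) (hrun : run % 2 = 0) :
    splitBFin (l.foldl splitBStep (out, tok, run)) =
      out ++ [String.ofList tok] ++ greedyTok l := by
  match l with
  | [] => simp [splitBFin, htok, greedyTok]
  | c :: rest =>
    have hstep : splitBStep (out, tok, run) c =
        (out ++ [String.ofList tok], [c], if c = 'n' ∨ c = 's' then run + 1 else 0) := by
      simp [splitBStep, htok, hrun]
    by_cases hns : c = 'n' ∨ c = 's'
    · match rest with
      | [] =>
        simp [List.foldl, hstep, hns, splitBFin, greedyTok]
      | d :: rest' =>
        have hstep2 : splitBStep (out ++ [String.ofList tok], [c], run + 1) d =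
            (out ++ [String.ofList tok], [c, d],
              if d = 'n' ∨ d = 's' then run + 2 else 0) := by
          have hodd : (run + 1) % 2 ≠ 0 := by omega
          simp [splitBStep, hodd]
        have hrec := foldB_done rest' (out ++ [String.ofList tok]) [c, d]
          (if d = 'n' ∨ d = 's' then run + 2 else 0) (by simp)
          (by by_cases h : d = 'n' ∨ d = 's' <;> simp only [h, if_true, if_false] <;> omega)
        simp only [List.foldl, hstep, hns, if_pos, hstep2, hrec, greedyTok]
        simp
    · have hrec := foldB_done rest (out ++ [String.ofList tok]) [c] 0 (by simp) (by omega)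
      rw [List.foldl, hstep, if_neg hns, hrec]
      conv_rhs => rw [greedyTok.eq_def]
      simp [hns]

-- B's fold from the initial state computes the greedy tokenisation
theorem foldB_start (l : List Char) (out : List String) :
    splitBFin (l.foldl splitBStep (out, [], 0)) = out ++ greedyTok l := by
  match l with
  | [] => simp [splitBFin, greedyTok]
  | c :: rest =>
    have hstep : splitBStep (out, [], 0) c =
        (out, [c], if c = 'n' ∨ c = 's' then 1 else 0) := by
      simp [splitBStep]
    by_cases hns : c = 'n' ∨ c = 's'
    · match rest with
      | [] => simp [List.foldl, hstep, hns, splitBFin, greedyTok]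
      | d :: rest' =>
        have hstep2 : splitBStep (out, [c], 1) d =
            (out, [c, d], if d = 'n' ∨ d = 's' then 2 else 0) := by
          simp [splitBStep]
        have hrec := foldB_done rest' out [c, d]
          (if d = 'n' ∨ d = 's' then 2 else 0) (by simp)
          (by by_cases h : d = 'n' ∨ d = 's' <;> simp [h])
        simp only [List.foldl, hstep, hns, if_pos, hstep2, hrec, greedyTok]
        simp
    · have hrec := foldB_done rest out [c] 0 (by simp) (by omega)
      rw [List.foldl, hstep, if_neg hns, hrec]
      conv_rhs => rw [greedyTok.eq_def]
      simp [hns]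

-- ===== VERDICT (by name: the statement is the Claim_ definition above) =====
theorem split_directions_spec : Claim_equal_split_directions := by
  intro s _
  unfold Spec_split_directions split_directions split_directions_alt
  rw [splitALoop_eq_greedy s.toList 0]
  simpa using (foldB_start s.toList []).symm
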